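-- pv_equiv track=rewrite | github.com/Chenade/42_Gomoku | develop/game/rule_win.py | has_continuous_sequence
-- ===== SOURCE A (Python) =====
-- def has_continuous_sequence(line):
--     count = 0
--     last_value = None
--     for value in line:
--         if value == last_value and value != 0:
--             count += 1
--         else:
--             count = 1
--             last_value = value
--         if count >= 5:
--             return True
--     return False
-- ===== SOURCE B (Python) =====
-- def has_continuous_sequence(line):
--     return any(line[i] != 0 and line[i:i+5] == [line[i]] * 5
--                for i in range(len(line) - 4))
-- ===== Notes on version B (the rewrite author's own statement) =====
-- stated objective: idiomatic
-- what changed: Replaced the running counter/last_value state machine with a sliding-window test: any index i with line[i] != 0 and line[i:i+5] equal to five copies of line[i].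
import Mathlib
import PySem

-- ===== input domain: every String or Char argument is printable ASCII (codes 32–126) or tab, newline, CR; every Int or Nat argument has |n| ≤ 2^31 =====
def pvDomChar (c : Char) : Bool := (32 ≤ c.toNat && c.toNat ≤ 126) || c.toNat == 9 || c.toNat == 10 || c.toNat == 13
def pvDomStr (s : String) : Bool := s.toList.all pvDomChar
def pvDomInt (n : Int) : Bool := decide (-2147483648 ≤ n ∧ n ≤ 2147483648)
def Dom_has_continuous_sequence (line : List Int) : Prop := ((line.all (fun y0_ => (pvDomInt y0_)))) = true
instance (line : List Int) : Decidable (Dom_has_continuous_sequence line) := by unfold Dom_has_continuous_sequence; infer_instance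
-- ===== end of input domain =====

-- B replaces A's running counter/last_value state machine by a sliding-window test
-- (any i with line[i] != 0 and line[i:i+5] == [line[i]]*5); objective: idiomatic.

-- ===== PORT A =====
-- the for-loop of A: state (count, last_value), early return True when count >= 5
def hcsLoop : List Int → Int → Option Int → Bool
  | [], _, _ => false
  | v :: rest, count, last =>
    let st := if some v = last ∧ v ≠ 0 then (count + 1, last) else ((1 : Int), some v)
    if st.1 ≥ 5 then true else hcsLoop rest st.1 st.2

def has_continuous_sequence (line : List Int) : Bool := hcsLoop line 0 none

-- ===== PORT B =====
-- one term of B's generator: line[i] != 0 and line[i:i+5] == [line[i]] * 5  (i is always in range)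
def hcsWin (line : List Int) (i : Nat) : Bool :=
  let v := line.getD i 0
  decide (v ≠ 0) && (PySem.List.slice line (some (i : Int)) (some ((i : Int) + 5)) == List.replicate 5 v)

def has_continuous_sequence_alt (line : List Int) : Bool :=
  (List.range (line.length - 4)).any (fun i => hcsWin line i)

-- ===== PRECONDITION & SPEC =====
def Spec_has_continuous_sequence (line : List Int) (out : Bool) : Prop := out = has_continuous_sequence_alt line
instance (line : List Int) (out : Bool) : Decidable (Spec_has_continuous_sequence line out) := by unfold Spec_has_continuous_sequence; infer_instance

-- ===== CLAIM (what is proved, stated in full; the proofs are below) =====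
def Claim_equal_has_continuous_sequence : Prop := ∀ (line : List Int), Dom_has_continuous_sequence line → Spec_has_continuous_sequence line (has_continuous_sequence line)

-- ===== LEMMAS AND PROOFS =====

-- proof-side characterisation: a run of five starting at the head, resp. anywhere
def pvWin (v : Int) (rest : List Int) : Bool :=
  decide (v ≠ 0) && ((rest.take 4).length == 4) && (rest.take 4).all (· == v)

def pvHasWin : List Int → Bool
  | [] => false
  | v :: rest => pvWin v rest || pvHasWin rest

lemma pvHasWin_short : ∀ (l : List Int), l.length < 5 → pvHasWin l = false := by
  intro l
  induction l with
  | nil => intro _; rfl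
  | cons v rest ih =>
    intro h
    simp only [List.length_cons] at h
    simp only [pvHasWin, ih (by omega), Bool.or_false, pvWin]
    have hl : (rest.take 4).length = rest.length := by simp; omega
    simp [hl]
    omega

lemma hcsLoop_cons_same (x : Int) (rest : List Int) (c : Int) (hx0 : x ≠ 0) :
    hcsLoop (x :: rest) c (some x)
      = if c + 1 ≥ 5 then true else hcsLoop rest (c + 1) (some x) := by
  simp [hcsLoop, hx0]

lemma hcsLoop_cons_other (x v : Int) (rest : List Int) (c : Int) (hx : ¬ (x = v ∧ x ≠ 0)) :
    hcsLoop (x :: rest) c (some v) = hcsLoop rest 1 (some x) := by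
  simp [hcsLoop, hx]

lemma loop_char : ∀ (l : List Int) (c : Nat) (v : Int), 1 ≤ c → c < 5 →
    (hcsLoop l (c : Int) (some v) = true ↔
      (v ≠ 0 ∧ (l.take (5 - c)).length = 5 - c ∧ ∀ x ∈ l.take (5 - c), x = v) ∨ pvHasWin l = true) := by
  intro l
  induction l with
  | nil =>
    intro c v h1 h5
    simp only [hcsLoop, pvHasWin, List.take_nil, List.length_nil]
    constructor
    · intro h; cases h
    · rintro (⟨_, h, _⟩ | h)
      · omega
      · cases h
  | cons x rest ih =>
    intro c v h1 h5
    by_cases hx : x = v ∧ x ≠ 0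
    · obtain ⟨hxv, hx0⟩ := hx
      subst hxv
      rw [hcsLoop_cons_same x rest (c : Int) hx0]
      by_cases hc4 : c = 4
      · subst hc4
        rw [if_pos (by omega)]
        have h1t : 5 - 4 = 1 := rfl
        simp only [h1t, List.take_succ_cons, List.take_zero]
        constructor
        · intro _
          left
          exact ⟨hx0, by simp, by simp⟩
        · intro _; trivial
      · rw [if_neg (by omega)]
        have hcast : (c : Int) + 1 = ((c + 1 : Nat) : Int) := by push_cast; ring
        rw [hcast, ih (c + 1) x (by omega) (by omega)]
        have h45 : 5 - (c + 1) = 4 - c := by omega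
        have h54 : 5 - c = (4 - c) + 1 := by omega
        rw [h45]
        simp only [pvHasWin, Bool.or_eq_true]
        constructor
        · rintro (⟨h0, hlen, hall⟩ | h)
          · left
            rw [h54]
            refine ⟨h0, by simp [List.take_succ_cons, hlen], ?_⟩
            intro y hy
            rw [List.take_succ_cons] at hy
            rcases List.mem_cons.mp hy with h | h
            · exact h
            · exact hall y h
          · right; right; exact h
        · rintro (⟨h0, hlen, hall⟩ | hwin | h)
          · left
            rw [h54, List.take_succ_cons] at hlen hall
            refine ⟨h0, by simpa using hlen, fun y hy => hall y (List.mem_cons_of_mem _ hy)⟩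
          · -- a full window starting at x absorbs into the partial-run disjunct
            left
            simp only [pvWin, Bool.and_eq_true, decide_eq_true_eq, beq_iff_eq,
              List.all_eq_true] at hwin
            obtain ⟨⟨h0, hlen4⟩, hall4⟩ := hwin
            have hsub : rest.take (4 - c) = (rest.take 4).take (4 - c) := by
              rw [List.take_take]; congr 1; omega
            refine ⟨h0, ?_, ?_⟩
            · rw [hsub, List.length_take, hlen4]; omega
            · intro y hy
              rw [hsub] at hy
              simpa using hall4 y (List.mem_of_mem_take hy)
          · right; exact h
    · rw [hcsLoop_cons_other x v rest (c : Int) hx]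
      rw [show (1 : Int) = ((1 : Nat) : Int) from rfl, ih 1 x (le_refl 1) (by omega)]
      simp only [pvHasWin, Bool.or_eq_true]
      constructor
      · rintro (⟨h0, hlen, hall⟩ | h)
        · right; left
          simp only [pvWin, Bool.and_eq_true, decide_eq_true_eq, beq_iff_eq, List.all_eq_true]
          exact ⟨⟨h0, by simpa using hlen⟩, fun y hy => by simpa using hall y hy⟩
        · right; right; exact h
      · rintro (⟨h0, hlen, hall⟩ | hwin | h)
        · -- impossible: the window at the head would force x = v and x ≠ 0
          exfalso
          have hmem : x ∈ (x :: rest).take (5 - c) := by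
            cases h : 5 - c with
            | zero => omega
            | succ n => rw [List.take_succ_cons]; exact List.mem_cons_self
          exact hx ⟨hall x hmem, by rw [hall x hmem]; exact h0⟩
        · left
          simp only [pvWin, Bool.and_eq_true, decide_eq_true_eq, beq_iff_eq,
            List.all_eq_true] at hwin
          obtain ⟨⟨h0, hlen4⟩, hall4⟩ := hwin
          exact ⟨h0, by simpa using hlen4, fun y hy => by simpa using hall4 y hy⟩
        · right; exact h

lemma a_eq_pvHasWin : ∀ (l : List Int), has_continuous_sequence l = pvHasWin l := by
  intro l
  cases l with
  | nil => rfl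
  | cons v rest =>
    have step : has_continuous_sequence (v :: rest) = hcsLoop rest ((1 : Nat) : Int) (some v) := by
      simp [has_continuous_sequence, hcsLoop]
    rw [step]
    rw [Bool.eq_iff_iff, loop_char rest 1 v (le_refl 1) (by omega)]
    simp only [pvHasWin, Bool.or_eq_true, pvWin, Bool.and_eq_true, decide_eq_true_eq,
      beq_iff_eq, List.all_eq_true]
    constructor
    · rintro (⟨h0, hlen, hall⟩ | h)
      · left; exact ⟨⟨h0, by simpa using hlen⟩, fun y hy => by simpa using hall y hy⟩
      · right; exact h
    · rintro (⟨⟨h0, hlen⟩, hall⟩ | h)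
      · left; exact ⟨h0, by simpa using hlen, fun y hy => by simpa using hall y hy⟩
      · right; exact h

lemma any_congr' {α : Type} (l : List α) (p q : α → Bool) (h : ∀ x ∈ l, p x = q x) :
    l.any p = l.any q := by
  rw [Bool.eq_iff_iff, List.any_eq_true, List.any_eq_true]
  exact ⟨fun ⟨i, hi, hp⟩ => ⟨i, hi, (h i hi) ▸ hp⟩, fun ⟨i, hi, hq⟩ => ⟨i, hi, (h i hi) ▸ hq⟩⟩

lemma hcsWin_eq (line : List Int) (i : Nat) :
    hcsWin line i =
      (decide (line.getD i 0 ≠ 0) && ((line.drop i).take 5 == List.replicate 5 (line.getD i 0))) := by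
  unfold hcsWin
  rw [show ((i : Int) + 5) = ((i : Int) + ((5 : Nat) : Int)) by norm_num,
    PySem.List.slice_natCast_add]

lemma b_eq_pvHasWin : ∀ (l : List Int), has_continuous_sequence_alt l = pvHasWin l := by
  intro l
  induction l with
  | nil => rfl
  | cons v rest ih =>
    by_cases hr : 4 ≤ rest.length
    · have hlen : (v :: rest).length - 4 = (rest.length - 4) + 1 := by
        simp only [List.length_cons]; omega
      unfold has_continuous_sequence_alt
      rw [hlen, List.range_succ_eq_map, List.any_cons, List.any_map]
      have htail : (List.range (rest.length - 4)).any ((fun i => hcsWin (v :: rest) i) ∘ Nat.succ)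
          = (List.range (rest.length - 4)).any (fun i => hcsWin rest i) := by
        apply any_congr'
        intro i _
        simp only [Function.comp, hcsWin_eq]
        rfl
      rw [htail]
      have hhead : hcsWin (v :: rest) 0 = pvWin v rest := by
        rw [hcsWin_eq]
        simp only [List.getD_cons_zero, List.drop_zero, List.take_succ_cons, pvWin]
        rw [Bool.eq_iff_iff]
        simp only [Bool.and_eq_true, decide_eq_true_eq, beq_iff_eq, List.all_eq_true]
        constructor
        · rintro ⟨h0, heq⟩
          have hrep : rest.take 4 = List.replicate 4 v := by
            rw [show (5 : Nat) = 4 + 1 from rfl, List.replicate_succ] at heq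
            exact List.cons.inj heq |>.2
          refine ⟨⟨h0, by simp [hrep]⟩, ?_⟩
          intro y hy
          rw [hrep] at hy
          simpa using List.eq_of_mem_replicate hy
        · rintro ⟨⟨h0, hlen4⟩, hall⟩
          refine ⟨h0, ?_⟩
          rw [show (5 : Nat) = 4 + 1 from rfl, List.replicate_succ]
          congr 1
          exact List.eq_replicate_iff.mpr ⟨by simpa using hlen4, fun y hy => by simpa using hall y hy⟩
      rw [hhead]
      rw [show ((List.range (rest.length - 4)).any (fun i => hcsWin rest i))
            = has_continuous_sequence_alt rest from rfl, ih]
      rfl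
    · have h0 : (v :: rest).length - 4 = 0 := by simp only [List.length_cons]; omega
      unfold has_continuous_sequence_alt
      rw [h0]
      rw [pvHasWin_short _ (by simp only [List.length_cons]; omega)]
      rfl

-- ===== VERDICT (by name: the statement is the Claim_ definition above) =====
theorem has_continuous_sequence_spec : Claim_equal_has_continuous_sequence := by
  intro line _
  unfold Spec_has_continuous_sequence
  rw [a_eq_pvHasWin, b_eq_pvHasWin]
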